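-- pv_equiv track=rewrite | github.com/mrthawee/training | python/recursion/count_num_subsets_sum_to_k.py | helper
-- ===== SOURCE A (Python) =====
-- def helper(S, i, k, slate, slatesum):
--     if slatesum > k:
--         return 0
--
--     if slatesum == k:
--         return 1
--
--     if i == len(S):
--         return 0
--     else:
--         return helper(S, i+1, k, slate, slatesum) + helper(S, i+1, k, slate, slatesum+S[i])
-- ===== SOURCE B (Python) =====
-- def helper(S, i, k, slate, slatesum):
--     if slatesum > k:
--         return 0
--     if slatesum == k:
--         return 1
--     result = 0
--     active = {slatesum: 1}
--     for j in range(i, len(S)):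
--         if not active:
--             break
--         nxt = {}
--         for t, c in active.items():
--             nxt[t] = nxt.get(t, 0) + c
--             u = t + S[j]
--             if u == k:
--                 result += c
--             elif u < k:
--                 nxt[u] = nxt.get(u, 0) + c
--         active = nxt
--     return result
-- ===== Notes on version B (the rewrite author's own statement) =====
-- stated objective: faster
-- what changed: A's exponential include/exclude recursion is replaced by an iterative forward DP that scans the indices once, keeping a dict from partial sum to number of live paths (equal sums merged) and accumulating hits of k.
import Mathlib
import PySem

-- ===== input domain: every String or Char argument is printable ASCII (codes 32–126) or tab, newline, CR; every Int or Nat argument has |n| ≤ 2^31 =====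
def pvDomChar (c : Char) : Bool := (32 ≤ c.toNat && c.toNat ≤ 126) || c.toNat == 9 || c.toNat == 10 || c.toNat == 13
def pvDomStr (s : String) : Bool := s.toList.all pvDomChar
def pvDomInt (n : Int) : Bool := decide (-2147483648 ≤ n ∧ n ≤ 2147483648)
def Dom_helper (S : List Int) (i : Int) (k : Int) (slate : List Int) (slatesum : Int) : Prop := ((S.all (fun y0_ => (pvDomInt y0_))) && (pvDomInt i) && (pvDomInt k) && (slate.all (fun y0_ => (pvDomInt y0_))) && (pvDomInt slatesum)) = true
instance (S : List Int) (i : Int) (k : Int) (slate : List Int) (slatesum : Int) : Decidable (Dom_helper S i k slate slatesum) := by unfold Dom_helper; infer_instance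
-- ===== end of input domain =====

-- B replaces A's exponential include/exclude recursion by a forward frontier DP that merges
-- equal partial sums in a dict (sum -> number of paths), accumulating hits of k as it scans.

-- ===== PORT A =====
-- A's recursion is not structurally decreasing in Lean, so it carries a fuel argument;
-- the top-level call supplies fuel (len S - i).toNat, which under Pre_helper is never exhausted
-- (the `| 0 => 0` and `| none => 0` fallbacks are totality devices only, unreachable under Pre_helper).
def helperFuel (S : List Int) (k : Int) (fuel : Nat) (i slatesum : Int) : Int :=
  if k < slatesum then 0
  else if slatesum = k then 1
  else if i = PySem.List.len S then 0
  else match fuel with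
    | 0 => 0
    | f + 1 =>
      match PySem.List.pyGet? S i with
      | none => 0
      | some x => helperFuel S k f (i + 1) slatesum + helperFuel S k f (i + 1) (slatesum + x)

def helper (S : List Int) (i : Int) (k : Int) (slate : List Int) (slatesum : Int) : Int :=
  helperFuel S k (PySem.List.len S - i).toNat i slatesum

-- ===== PORT B =====
-- one item (t, c) of `active`: keep t (exclude S[j]); route t + S[j] (include) to result / nxt / nowhere
def stepB (k x : Int) (acc : Int × PySem.Dict Int Int) (tc : Int × Int) : Int × PySem.Dict Int Int :=
  let nxt := acc.2.insert tc.1 (acc.2.getD tc.1 0 + tc.2)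
  let u := tc.1 + x
  if u = k then (acc.1 + tc.2, nxt)
  else if u < k then (acc.1, nxt.insert u (nxt.getD u 0 + tc.2))
  else (acc.1, nxt)

-- the `for j in range(i, len(S))` loop of Source B, with its `if not active: break`
def loopB (k : Int) (S : List Int) : List Int → Int → PySem.Dict Int Int → Int
  | [], result, _ => result
  | j :: rest, result, active =>
    if active.size = 0 then result
    else
      match PySem.List.pyGet? S j with
      | none => 0  -- IndexError; unreachable under Pre_helper
      | some x =>
        let p := active.items.foldl (stepB k x) (result, PySem.Dict.empty)
        loopB k S rest p.1 p.2

def helper_alt (S : List Int) (i : Int) (k : Int) (slate : List Int) (slatesum : Int) : Int :=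
  if k < slatesum then 0
  else if slatesum = k then 1
  else loopB k S (PySem.List.pyRange i (PySem.List.len S) 1) 0 (PySem.Dict.empty.insert slatesum 1)

-- ===== PRECONDITION & SPEC =====
-- Pre_helper is exactly the set of inputs on which the Python A returns: outside it A raises
-- (IndexError for i < -len(S), RecursionError for i > len(S)) whenever neither prune fires.
def Pre_helper (S : List Int) (i : Int) (k : Int) (slate : List Int) (slatesum : Int) : Prop :=
  k < slatesum ∨ slatesum = k ∨ (-(S.length : Int) ≤ i ∧ i ≤ (S.length : Int))
instance (S : List Int) (i : Int) (k : Int) (slate : List Int) (slatesum : Int) : Decidable (Pre_helper S i k slate slatesum) := by unfold Pre_helper; infer_instance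

def pvWitness_helper : List Int × Int × Int × List Int × Int := ([1, 2, 3], 0, 3, [], 0)

def Spec_helper (S : List Int) (i : Int) (k : Int) (slate : List Int) (slatesum : Int) (out : Int) : Prop := out = helper_alt S i k slate slatesum
instance (S : List Int) (i : Int) (k : Int) (slate : List Int) (slatesum : Int) (out : Int) : Decidable (Spec_helper S i k slate slatesum out) := by unfold Spec_helper; infer_instance

-- ===== CLAIM (what is proved, stated in full; the proofs are below) =====
def Claim_equal_helper : Prop := ∀ (S : List Int) (i : Int) (k : Int) (slate : List Int) (slatesum : Int), Dom_helper S i k slate slatesum → Pre_helper S i k slate slatesum → Spec_helper S i k slate slatesum (helper S i k slate slatesum)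

-- ===== LEMMAS AND PROOFS =====

-- weight of an association list of (partial sum, multiplicity) under a valuation g
def wsum (g : Int → Int) (l : List (Int × Int)) : Int := (l.map (fun p => p.2 * g p.1)).sum

theorem wsum_nil (g : Int → Int) : wsum g [] = 0 := rfl

theorem wsum_append (g : Int → Int) (a b : List (Int × Int)) :
    wsum g (a ++ b) = wsum g a + wsum g b := by
  simp [wsum]

theorem wsum_zero (g : Int → Int) (l : List (Int × Int)) (h : ∀ p ∈ l, g p.1 = 0) :
    wsum g l = 0 := by
  induction l with
  | nil => rfl
  | cons p l ih =>
    simp only [wsum, List.map_cons, List.sum_cons] at *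
    rw [h p (by simp), ih (fun q hq => h q (by simp [hq]))]; ring

theorem wsum_congr (g g' : Int → Int) (l : List (Int × Int)) (h : ∀ p ∈ l, g p.1 = g' p.1) :
    wsum g l = wsum g' l := by
  induction l with
  | nil => rfl
  | cons p l ih =>
    simp only [wsum, List.map_cons, List.sum_cons] at *
    rw [h p (by simp), ih (fun q hq => h q (by simp [hq]))]

-- adding c at key t changes the weight by c * g t
theorem wsum_insert_add (g : Int → Int) (d : PySem.Dict Int Int) (t c : Int)
    (hd : d.keys.Nodup) :
    wsum g ((d.insert t (d.getD t 0 + c)).items) = wsum g d.items + c * g t := by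
  by_cases hc : d.contains t = true
  · rw [PySem.Dict.items_insert_of_contains d _ hc]
    have ht : t ∈ d.items.map Prod.fst := (PySem.Dict.contains_iff_mem_keys d t).mp hc
    obtain ⟨p, hp, hpt⟩ := List.mem_map.mp ht
    obtain ⟨l1, l2, hdecomp⟩ := List.append_of_mem hp
    have hv : d.getD t 0 = p.2 := by
      have : (t, p.2) ∈ d.items := by rw [← hpt]; exact hp
      exact PySem.Dict.getD_of_mem_items d this hd 0
    have hkeys : d.keys = l1.map Prod.fst ++ p.1 :: l2.map Prod.fst := by
      show d.items.map Prod.fst = _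
      rw [hdecomp]; simp
    rw [hkeys] at hd
    obtain ⟨nd1, nd2, disj⟩ := List.nodup_append.mp hd
    have hnl1 : ∀ q ∈ l1, q.1 ≠ t := by
      intro q hq he
      exact disj q.1 (List.mem_map.mpr ⟨q, hq, rfl⟩) p.1 (by simp) (by rw [he, ← hpt])
    have hnl2 : ∀ q ∈ l2, q.1 ≠ t := by
      intro q hq he
      exact (List.nodup_cons.mp nd2).1
        (by rw [hpt, ← he]; exact List.mem_map.mpr ⟨q, hq, rfl⟩)
    have hmap : ∀ (l : List (Int × Int)), (∀ q ∈ l, q.1 ≠ t) →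
        l.map (fun q => if (q.1 == t) = true then (t, d.getD t 0 + c) else q) = l := by
      intro l hl
      have := List.map_congr_left
        (l := l) (f := fun q => if (q.1 == t) = true then (t, d.getD t 0 + c) else q)
        (g := id) (fun q hq => by simp only [beq_iff_eq, if_neg (hl q hq), id_eq])
      simpa using this
    rw [hdecomp, List.map_append, List.map_cons, hmap l1 hnl1, hmap l2 hnl2]
    have hpeq : (if (p.1 == t) = true then (t, d.getD t 0 + c) else p) = (t, p.2 + c) := by
      rw [if_pos (by simp [hpt]), hv]
    rw [hpeq, wsum_append, wsum_append]
    simp only [wsum, List.map_cons, List.sum_cons]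
    rw [hpt]
    ring
  · have hc' : d.contains t = false := by simpa using hc
    rw [PySem.Dict.items_insert_of_not_contains d _ hc', PySem.Dict.getD_of_not_contains d 0 hc']
    simp only [wsum, List.map_append, List.sum_append, List.map_cons, List.map_nil,
      List.sum_cons, List.sum_nil]
    ring

-- one pass of the inner `for t, c in active.items()` loop
theorem fold_stepB (k x : Int) (g : Int → Int) (hgk : g k = 1) (hg0 : ∀ u, k < u → g u = 0)
    (l : List (Int × Int)) :
    ∀ (r : Int) (d : PySem.Dict Int Int), d.keys.Nodup → (∀ t ∈ d.keys, t < k) →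
    (∀ p ∈ l, p.1 < k) →
    ((l.foldl (stepB k x) (r, d)).2.keys.Nodup ∧
     (∀ t ∈ (l.foldl (stepB k x) (r, d)).2.keys, t < k) ∧
     (l.foldl (stepB k x) (r, d)).1 + wsum g (l.foldl (stepB k x) (r, d)).2.items
         = r + wsum g d.items + (l.map (fun p => p.2 * (g p.1 + g (p.1 + x)))).sum) := by
  induction l with
  | nil =>
    intro r d hd hk _
    exact ⟨hd, hk, by simp⟩
  | cons p rest ih =>
    intro r d hd hk hl
    have hp1 : p.1 < k := hl p (by simp)
    have hrest : ∀ q ∈ rest, q.1 < k := fun q hq => hl q (by simp [hq])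
    have hnxt_nd : (d.insert p.1 (d.getD p.1 0 + p.2)).keys.Nodup :=
      PySem.Dict.nodup_keys_insert d _ _ hd
    have hnxt_k : ∀ t ∈ (d.insert p.1 (d.getD p.1 0 + p.2)).keys, t < k := by
      intro t htm
      rcases (PySem.Dict.mem_keys_insert d _ t _).mp htm with h | h
      · omega
      · exact hk t h
    have hnxt_w : wsum g ((d.insert p.1 (d.getD p.1 0 + p.2)).items)
        = wsum g d.items + p.2 * g p.1 := wsum_insert_add g d p.1 p.2 hd
    by_cases hu1 : p.1 + x = k
    · have hstep : stepB k x (r, d) p = (r + p.2, d.insert p.1 (d.getD p.1 0 + p.2)) := by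
        simp [stepB, hu1]
      rw [List.foldl_cons, hstep]
      obtain ⟨c1, c2, c3⟩ := ih (r + p.2) _ hnxt_nd hnxt_k hrest
      refine ⟨c1, c2, ?_⟩
      rw [c3, hnxt_w]
      simp only [List.map_cons, List.sum_cons, hu1, hgk]
      ring
    · by_cases hu2 : p.1 + x < k
      · have hstep : stepB k x (r, d) p
            = (r, (d.insert p.1 (d.getD p.1 0 + p.2)).insert (p.1 + x)
                ((d.insert p.1 (d.getD p.1 0 + p.2)).getD (p.1 + x) 0 + p.2)) := by
          simp [stepB, hu1, hu2]
        rw [List.foldl_cons, hstep]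
        have hnd2 : ((d.insert p.1 (d.getD p.1 0 + p.2)).insert (p.1 + x)
            ((d.insert p.1 (d.getD p.1 0 + p.2)).getD (p.1 + x) 0 + p.2)).keys.Nodup :=
          PySem.Dict.nodup_keys_insert _ _ _ hnxt_nd
        have hk2 : ∀ t ∈ ((d.insert p.1 (d.getD p.1 0 + p.2)).insert (p.1 + x)
            ((d.insert p.1 (d.getD p.1 0 + p.2)).getD (p.1 + x) 0 + p.2)).keys, t < k := by
          intro t htm
          rcases (PySem.Dict.mem_keys_insert _ _ t _).mp htm with h | h
          · omega
          · exact hnxt_k t h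
        obtain ⟨c1, c2, c3⟩ := ih r _ hnd2 hk2 hrest
        refine ⟨c1, c2, ?_⟩
        rw [c3, wsum_insert_add g _ _ _ hnxt_nd, hnxt_w]
        simp only [List.map_cons, List.sum_cons]
        ring
      · have hu3 : k < p.1 + x := by omega
        have hstep : stepB k x (r, d) p = (r, d.insert p.1 (d.getD p.1 0 + p.2)) := by
          simp only [stepB, if_neg hu1, if_neg (by omega : ¬ p.1 + x < k)]
        rw [List.foldl_cons, hstep]
        obtain ⟨c1, c2, c3⟩ := ih r _ hnxt_nd hnxt_k hrest
        refine ⟨c1, c2, ?_⟩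
        rw [c3, hnxt_w]
        simp only [List.map_cons, List.sum_cons, hg0 _ hu3]
        ring

-- the outer loop computes r plus the weight of the frontier under A's recursion
theorem loopB_eq (S : List Int) (k : Int) :
    ∀ (m : Nat) (j r : Int) (d : PySem.Dict Int Int),
      m = ((S.length : Int) - j).toNat → -(S.length : Int) ≤ j →
      d.keys.Nodup → (∀ t ∈ d.keys, t < k) →
      loopB k S (PySem.List.pyRange j (PySem.List.len S) 1) r d
        = r + wsum (fun t => helperFuel S k m j t) d.items := by
  intro m
  induction m with
  | zero =>
    intro j r d hm hj hd hk
    have hjn : (S.length : Int) ≤ j := by omega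
    rw [PySem.List.len_eq, PySem.List.pyRange_one_eq_nil hjn]
    simp only [loopB]
    have : wsum (fun t => helperFuel S k 0 j t) d.items = 0 := by
      apply wsum_zero
      intro p hp
      have hpk : p.1 < k := hk p.1 (List.mem_map.mpr ⟨p, hp, rfl⟩)
      rw [helperFuel.eq_def, if_neg (by omega), if_neg (by omega)]
      split <;> rfl
    rw [this]; ring
  | succ m ih =>
    intro j r d hm hj hd hk
    have hjn : j < (S.length : Int) := by omega
    rw [PySem.List.len_eq, PySem.List.pyRange_one_cons hjn]
    simp only [loopB]
    by_cases hsz : d.size = 0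
    · rw [if_pos hsz]
      have hitems : d.items = [] := List.length_eq_zero_iff.mp hsz
      rw [hitems, wsum_nil]; ring
    · rw [if_neg hsz]
      have hir : PySem.Raise.InRange S.length j := by
        simp only [PySem.Raise.InRange]; omega
      have hget : PySem.List.pyGet? S j ≠ none := fun h =>
        (PySem.List.pyGet?_eq_none_iff S j).mp h hir
      obtain ⟨x, hx⟩ := Option.ne_none_iff_exists'.mp hget
      rw [hx]
      dsimp only
      simp only [PySem.List.len_eq] at ih
      have hlk : ∀ p ∈ d.items, p.1 < k := fun p hp =>
        hk p.1 (List.mem_map.mpr ⟨p, hp, rfl⟩)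
      obtain ⟨c1, c2, c3⟩ := fold_stepB k x (fun t => helperFuel S k m (j + 1) t)
        (by simp only []; rw [helperFuel.eq_def, if_neg (by omega), if_pos rfl])
        (fun u hu => by simp only []; rw [helperFuel.eq_def, if_pos hu])
        d.items r PySem.Dict.empty (by simp)
        (by simp [PySem.Dict.keys_empty]) hlk
      rw [ih (j + 1) _ _ (by omega) (by omega) c1 c2, c3]
      have hempty : wsum (fun t => helperFuel S k m (j + 1) t) PySem.Dict.empty.items = 0 := by
        simp [wsum, PySem.Dict.empty]
      rw [hempty]
      have hcong : wsum (fun t => helperFuel S k (m + 1) j t) d.items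
          = wsum (fun t => helperFuel S k m (j + 1) t + helperFuel S k m (j + 1) (t + x)) d.items := by
        apply wsum_congr
        intro p hp
        have hpk : p.1 < k := hlk p hp
        conv_lhs => rw [helperFuel.eq_def]
        rw [PySem.List.len_eq, if_neg (by omega), if_neg (by omega), if_neg (by omega), hx]
      rw [hcong]
      simp only [wsum]
      ring

-- ===== VERDICT (by name: the statement is the Claim_ definition above) =====
theorem helper_spec : Claim_equal_helper := by
  intro S i k slate slatesum _ hpre
  unfold Spec_helper helper helper_alt
  by_cases h1 : k < slatesum
  · rw [helperFuel.eq_def, if_pos h1, if_pos h1]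
  · by_cases h2 : slatesum = k
    · rw [helperFuel.eq_def, if_neg h1, if_pos h2, if_neg h1, if_pos h2]
    · obtain ⟨hi1, hi2⟩ : -(S.length : Int) ≤ i ∧ i ≤ (S.length : Int) := by
        rcases hpre with h | h | h
        · omega
        · exact absurd h h2
        · exact h
      rw [if_neg h1, if_neg h2]
      have hslt : slatesum < k := by omega
      have hnc : PySem.Dict.empty.contains (κ := Int) (ν := Int) slatesum = false :=
        PySem.Dict.contains_empty slatesum
      have hitems : ((PySem.Dict.empty.insert slatesum (1 : Int)).items) = [(slatesum, 1)] := by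
        rw [PySem.Dict.items_insert_of_not_contains _ _ hnc]
        rfl
      rw [loopB_eq S k ((PySem.List.len S : Int) - i).toNat i 0 _
        (by rw [PySem.List.len_eq]) (by omega)
        (PySem.Dict.nodup_keys_insert _ _ _ PySem.Dict.nodup_keys_empty)
        (by
          intro t htm
          rcases (PySem.Dict.mem_keys_insert _ _ t _).mp htm with h | h
          · omega
          · rw [PySem.Dict.keys_empty] at h; exact absurd h (List.not_mem_nil)),
        hitems]
      simp only [wsum, List.map_cons, List.map_nil, List.sum_cons, List.sum_nil]
      rw [PySem.List.len_eq]
      ring
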